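-- pv_equiv track=rewrite | github.com/goblinqueen/gq_advent | 2023/day_13_point_of_incidence/incidence.py | check_cube
-- ===== SOURCE A (Python) =====
-- def pos(line):
--     out = []
--     for i in range(1, len(line)):
--         if line[max(0, 2*i - len(line)):i] == line[i:2*i][::-1]:
--             out.append(i)
--     return out
--
-- def check_cube(cube):
--     curr_pos = None
--     for line in cube:
--         if curr_pos is None:
--             curr_pos = pos(line)
--         else:
--             curr_pos = [x for x in pos(line) if x in curr_pos]
--     return curr_pos
-- ===== SOURCE B (Python) =====
-- def _mirrors(line):
--     # Manacher (even centers): rad[i] = radius of the longest even palindrome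
--     # centered at gap i; i is a reflection position iff that palindrome
--     # reaches an edge of the line, i.e. rad[i] == min(i, n - i).
--     n = len(line)
--     rad = [0] * (n + 1)
--     c = r = 0
--     for i in range(1, n):
--         k = min(r - i, rad[2 * c - i]) if i < r else 0
--         while k < i and i + k < n and line[i - k - 1] == line[i + k]:
--             k += 1
--         rad[i] = k
--         if i + k > r:
--             c, r = i, i + k
--     return [i for i in range(1, n) if rad[i] == min(i, n - i)]
--
--
-- def check_cube(cube):
--     counts = {}
--     for line in cube:
--         for i in _mirrors(line):
--             counts[i] = counts.get(i, 0) + 1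
--     return [i for i in sorted(counts) if counts[i] == len(cube)]
-- ===== Notes on version B (the rewrite author's own statement) =====
-- stated objective: alternative
-- what changed: Per line, reflection positions are computed with Manacher's algorithm for even-centered palindromes (a position is a mirror iff its palindromic radius reaches an edge), replacing A's per-position slice-vs-reversed-slice comparison; the cross-line intersection is replaced by one occurrence counter over all lines, keeping positions counted len(cube) times, emitted in sorted key order.
-- outside the precondition, e.g. on check_cube([]): A returns None, B returns []
import Mathlib
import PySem

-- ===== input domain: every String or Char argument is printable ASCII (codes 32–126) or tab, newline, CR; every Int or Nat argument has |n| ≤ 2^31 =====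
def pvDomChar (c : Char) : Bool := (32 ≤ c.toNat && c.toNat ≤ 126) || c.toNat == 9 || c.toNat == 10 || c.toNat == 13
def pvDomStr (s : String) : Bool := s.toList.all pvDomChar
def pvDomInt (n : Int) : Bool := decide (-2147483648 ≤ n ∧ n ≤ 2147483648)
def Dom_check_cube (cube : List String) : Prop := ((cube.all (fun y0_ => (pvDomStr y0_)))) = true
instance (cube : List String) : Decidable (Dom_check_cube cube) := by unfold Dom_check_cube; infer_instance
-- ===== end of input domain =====

-- B computes each line's reflection positions with Manacher's algorithm for
-- even-centered palindromes (a position is a mirror iff its palindromic radius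
-- reaches an edge) instead of A's per-position slice-vs-reversed-slice test,
-- and intersects across lines with one occurrence counter instead of repeated
-- list filtering (objective: alternative).

-- ===== PORT A =====
-- pos(line): positions i where line[max(0,2i-len):i] == line[i:2i][::-1]
def pvPosA (l : List Char) : List Int :=
  let n : Int := (l.length : Int)
  (PySem.List.pyRange 1 n 1).foldl
    (fun out i =>
      if PySem.List.slice l (some (max 0 (2*i - n))) (some i) =
         (PySem.List.slice? (PySem.List.slice l (some i) (some (2*i))) none none (-1)).getD []
      then out ++ [i] else out) []

def check_cube (cube : List String) : List Int :=
  (cube.foldl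
    (fun curr line =>
      match curr with
      | none => some (pvPosA line.toList)
      | some c => some ((pvPosA line.toList).filter (fun x => decide (x ∈ c))))
    (none : Option (List Int))).getD []   -- A returns None on []: excluded by Pre_

-- ===== PORT B =====
-- the while loop of _mirrors: while k < i and i + k < n and line[i-k-1] == line[i+k]: k += 1
def pvExtend (l : List Char) (i k : Int) : Int :=
  if h : k < i ∧ i + k < (l.length : Int) ∧
       PySem.List.pyGet? l (i - k - 1) = PySem.List.pyGet? l (i + k)
  then pvExtend l i (k + 1) else k
termination_by (i - k).toNat
decreasing_by omega

-- one iteration of the for-loop of _mirrors over state (rad, c, r)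
-- (rad[2*c-i] is read only when i < r, where pvInv below proves 1 ≤ 2*c-i < rad.length,
--  so the `.getD 0` default never fires; likewise rad[i] = k is always in range)
def pvManStep (l : List Char) (st : List Int × Int × Int) (i : Int) : List Int × Int × Int :=
  match st with
  | (rad, c, r) =>
    let k0 : Int := if i < r then min (r - i) ((PySem.List.pyGet? rad (2*c - i)).getD 0) else 0
    let k := pvExtend l i k0
    let rad' := PySem.List.pySetD rad i k
    if i + k > r then (rad', i, i + k) else (rad', c, r)

def pvMirrors (l : List Char) : List Int :=
  let n : Int := (l.length : Int)
  let st := (PySem.List.pyRange 1 n 1).foldl (pvManStep l) (List.replicate (n.toNat + 1) 0, 0, 0)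
  (PySem.List.pyRange 1 n 1).filter
    (fun i => (PySem.List.pyGet? st.1 i).getD 0 == min i (n - i))

def check_cube_alt (cube : List String) : List Int :=
  let counts :=
    cube.foldl
      (fun d line => (pvMirrors line.toList).foldl (fun d i => d.insert i (d.getD i 0 + 1)) d)
      (PySem.Dict.empty : PySem.Dict Int Int)
  (PySem.List.sorted (PySem.Dict.keys counts) (fun x => x)).filter
    (fun i => counts.getD i 0 == (cube.length : Int))   -- counts[i]: i ∈ keys, so present

-- ===== PRECONDITION & SPEC =====
-- Pre_ excludes only the empty list, on which A returns None (not a list of ints) while B returns [].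
def Pre_check_cube (cube : List String) : Prop := cube ≠ []
instance (cube : List String) : Decidable (Pre_check_cube cube) := by unfold Pre_check_cube; infer_instance
def pvWitness_check_cube : List String := ["#.##.", "#.##."]

def Spec_check_cube (cube : List String) (out : List Int) : Prop := out = check_cube_alt cube
instance (cube : List String) (out : List Int) : Decidable (Spec_check_cube cube out) := by unfold Spec_check_cube; infer_instance

-- ===== CLAIM (what is proved, stated in full; the proofs are below) =====
def Claim_equal_check_cube : Prop := ∀ (cube : List String), Dom_check_cube cube → Pre_check_cube cube → Spec_check_cube cube (check_cube cube)

-- ===== LEMMAS AND PROOFS =====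

-- "the first k symmetric character pairs around gap i all match"
def pvMatch (l : List Char) (i k : Int) : Prop :=
  ∀ j : Int, 0 ≤ j → j < k → PySem.List.pyGet? l (i - 1 - j) = PySem.List.pyGet? l (i + j)

lemma pv_ext_ge (l : List Char) (i k : Int) : k ≤ pvExtend l i k := by
  rw [pvExtend]
  split
  · have := pv_ext_ge l i (k + 1); omega
  · exact le_refl k
termination_by (i - k).toNat
decreasing_by omega

lemma pv_ext_le (l : List Char) (i k : Int) (h : k ≤ min i ((l.length : Int) - i)) :
    pvExtend l i k ≤ min i ((l.length : Int) - i) := by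
  rw [pvExtend]
  split
  · next hg => exact pv_ext_le l i (k + 1) (by omega)
  · exact h
termination_by (i - k).toNat
decreasing_by omega

lemma pv_ext_match (l : List Char) (i k : Int) (h : pvMatch l i k) :
    pvMatch l i (pvExtend l i k) := by
  rw [pvExtend]
  split
  · next hg =>
    apply pv_ext_match l i (k + 1)
    intro j hj0 hjk
    rcases lt_or_ge j k with hjlt | hjge
    · exact h j hj0 hjlt
    · have hjk' : j = k := by omega
      subst hjk'
      have := hg.2.2
      rw [show i - j - 1 = i - 1 - j from by ring] at this
      exact this
  · exact h
termination_by (i - k).toNat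
decreasing_by omega

lemma pv_ext_stop (l : List Char) (i k : Int)
    (h : ¬ (k < i ∧ i + k < (l.length : Int) ∧
        PySem.List.pyGet? l (i - k - 1) = PySem.List.pyGet? l (i + k))) :
    pvExtend l i k = k := by
  rw [pvExtend]; exact dif_neg h

lemma pv_ext_eq_of_match (l : List Char) (i : Int) :
    ∀ k : Int, 0 ≤ k → k ≤ min i ((l.length : Int) - i) → pvMatch l i k →
      pvExtend l i 0 = pvExtend l i k := by
  intro k hk0
  induction k, hk0 using Int.le_induction with
  | base => intro _ _; rfl
  | succ k hk0 ih =>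
    intro hkm hm
    have h1 : pvExtend l i 0 = pvExtend l i k :=
      ih (by omega) (fun j hj0 hjk => hm j hj0 (by omega))
    have hg : k < i ∧ i + k < (l.length : Int) ∧
        PySem.List.pyGet? l (i - k - 1) = PySem.List.pyGet? l (i + k) := by
      refine ⟨by omega, by omega, ?_⟩
      have := hm k hk0 (by omega)
      rw [show i - 1 - k = i - k - 1 from by ring] at this
      exact this
    rw [h1, pvExtend, dif_pos hg]

lemma pv_Rspec_zero (l : List Char) : pvExtend l 0 0 = 0 := by
  rw [pvExtend, dif_neg]
  rintro ⟨h, -, -⟩; omega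

-- A's slice condition at i equals the "all symmetric pairs match" test (two-pointer form)
lemma pv_take_drop_rev_iff {α : Type} (l : List α) (j m : Nat) (hm1 : m ≤ j) (hm2 : j + m ≤ l.length) :
    ((l.drop (j-m)).take m = ((l.drop j).take m).reverse) ↔ ∀ κ, κ < m → l[j-1-κ]? = l[j+κ]? := by
  have hL : ∀ κ : Nat, κ < m → ((l.drop (j-m)).take m)[κ]? = l[j-m+κ]? := by
    intro κ hκ; simp [hκ, List.getElem?_drop]
  have hR : ∀ κ : Nat, κ < m → (((l.drop j).take m).reverse)[κ]? = l[j+(m-1-κ)]? := by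
    intro κ hκ
    have hlen : ((l.drop j).take m).length = m := by simp; omega
    rw [List.getElem?_reverse (by omega)]
    rw [hlen]
    simp [List.getElem?_take, List.getElem?_drop]
    omega
  constructor
  · intro h κ hκ
    have e := congrArg (fun t => t[m-1-κ]?) h
    simp only at e
    rw [hL _ (by omega), hR _ (by omega)] at e
    have e1 : j - m + (m-1-κ) = j-1-κ := by omega
    have e2 : j + (m-1-(m-1-κ)) = j + κ := by omega
    rw [e1, e2] at e; exact e
  · intro h
    apply List.ext_getElem?
    intro κ
    by_cases hκ : κ < m
    · rw [hL _ hκ, hR _ hκ]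
      have := h (m-1-κ) (by omega)
      have e1 : j - 1 - (m-1-κ) = j - m + κ := by omega
      rw [e1] at this; exact this
    · have h1 : ((l.drop (j-m)).take m).length = m := by simp; omega
      have h2 : (((l.drop j).take m).reverse).length = m := by simp; omega
      rw [List.getElem?_eq_none (by omega), List.getElem?_eq_none (by omega)]

lemma pv_cond_iff_match (l : List Char) (j : Nat) (h1 : 1 ≤ j) (h2 : j < l.length) :
    (PySem.List.slice l (some (max 0 (2*(j:Int) - (l.length : Int)))) (some (j:Int)) =
       (PySem.List.slice? (PySem.List.slice l (some (j:Int)) (some (2*(j:Int)))) none none (-1)).getD [])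
    ↔ pvMatch l (j:Int) (min (j:Int) ((l.length : Int) - (j:Int))) := by
  rw [PySem.List.slice?_none_none_neg_one]
  simp only [Option.getD_some]
  have e2 : (2*(j:Int)) = ((2*j : Nat) : Int) := by push_cast; ring
  have emax : max 0 (2*(j:Int) - (l.length:Int)) = (((j - min j (l.length - j)) : Nat) : Int) := by
    omega
  rw [emax, e2, PySem.List.slice_natCast, PySem.List.slice_natCast]
  have e3 : j - (j - min j (l.length - j)) = min j (l.length - j) := by omega
  have e4 : 2*j - j = j := by omega
  rw [e3, e4]
  have e5 : (l.drop j).take j = (l.drop j).take (min j (l.length - j)) := by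
    rcases Nat.le_total j (l.length - j) with h | h
    · rw [min_eq_left h]
    · rcases Nat.eq_or_lt_of_le h with h2 | h2
      · rw [h2, min_self]
      · rw [List.take_of_length_le (by simp; omega), List.take_of_length_le (by simp; omega)]
  rw [e5]
  rw [pv_take_drop_rev_iff l j (min j (l.length - j)) (by omega) (by omega)]
  unfold pvMatch
  constructor
  · intro h κ hκ0 hκm
    have c1 : (j:Int) - 1 - κ = ((j - 1 - κ.toNat : Nat) : Int) := by omega
    have c2 : (j:Int) + κ = ((j + κ.toNat : Nat) : Int) := by omega
    rw [c1, c2, PySem.List.pyGet?_natCast, PySem.List.pyGet?_natCast]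
    exact h κ.toNat (by omega)
  · intro h κ hκ
    have := h (κ : Int) (by omega) (by omega)
    have c1 : (j:Int) - 1 - (κ:Int) = ((j - 1 - κ : Nat) : Int) := by omega
    have c2 : (j:Int) + (κ:Int) = ((j + κ : Nat) : Int) := by omega
    rw [c1, c2, PySem.List.pyGet?_natCast, PySem.List.pyGet?_natCast] at this
    exact this

-- Rspec = full-edge radius iff all symmetric pairs within min(i, n-i) match
lemma pv_R_eq_min_iff (l : List Char) (i : Int) (h1 : 1 ≤ i) (h2 : i < (l.length : Int)) :
    pvExtend l i 0 = min i ((l.length : Int) - i) ↔ pvMatch l i (min i ((l.length : Int) - i)) := by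
  constructor
  · intro h
    have := pv_ext_match l i 0 (by intro j hj0 hj; omega)
    rw [h] at this; exact this
  · intro h
    rw [pv_ext_eq_of_match l i (min i ((l.length : Int) - i)) (by omega) le_rfl h]
    apply pv_ext_stop
    rintro ⟨hg1, hg2, -⟩
    omega

-- invariant of the Manacher fold before processing index i
def pvInv (l : List Char) (i : Int) (st : List Int × Int × Int) : Prop :=
  st.1.length = l.length + 1 ∧
  (∀ j : Int, 1 ≤ j → j < i → PySem.List.pyGet? st.1 j = some (pvExtend l j 0)) ∧
  0 ≤ st.2.1 ∧ st.2.1 < i ∧ st.2.2 = st.2.1 + pvExtend l st.2.1 0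

lemma pv_pySetD_len (rad : List Int) (i : Int) (v : Int) (h0 : 0 ≤ i) (_hlt : i < (rad.length : Int)) :
    (PySem.List.pySetD rad i v).length = rad.length := by
  have : i = ((i.toNat : Nat) : Int) := by omega
  rw [this, PySem.List.pySetD_natCast]
  simp

lemma pv_pySetD_get (rad : List Int) (i j v : Int) (h0 : 0 ≤ i) (h1 : i < (rad.length : Int)) (hj : 0 ≤ j) :
    PySem.List.pyGet? (PySem.List.pySetD rad i v) j =
      if j = i then some v else PySem.List.pyGet? rad j := by
  have ei : i = ((i.toNat : Nat) : Int) := by omega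
  have ej : j = ((j.toNat : Nat) : Int) := by omega
  rw [ei, ej, PySem.List.pySetD_natCast, PySem.List.pyGet?_natCast, PySem.List.pyGet?_natCast]
  by_cases hij : j.toNat = i.toNat
  · rw [if_pos (by omega), hij, List.getElem?_set_self (by omega)]
  · rw [if_neg (by omega), List.getElem?_set_ne (Ne.symm hij)]

lemma pv_step (l : List Char) (i : Int) (st : List Int × Int × Int)
    (hi1 : 1 ≤ i) (hin : i < (l.length : Int)) (h : pvInv l i st) :
    pvInv l (i+1) (pvManStep l st i) := by
  obtain ⟨rad, c, r⟩ := st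
  obtain ⟨hlen, hrad, hc0, hci, hr⟩ := h
  dsimp only at hlen hrad hc0 hci hr
  have hcle : c ≤ (l.length : Int) := by omega
  have hRc0 : 0 ≤ pvExtend l c 0 := pv_ext_ge l c 0
  have hRcle : pvExtend l c 0 ≤ min c ((l.length : Int) - c) := pv_ext_le l c 0 (by omega)
  -- the starting radius k0 is sound and within bounds
  have hk0 : 0 ≤ (if i < r then min (r - i) ((PySem.List.pyGet? rad (2*c - i)).getD 0) else 0) ∧
      (if i < r then min (r - i) ((PySem.List.pyGet? rad (2*c - i)).getD 0) else 0) ≤ min i ((l.length : Int) - i) ∧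
      pvMatch l i (if i < r then min (r - i) ((PySem.List.pyGet? rad (2*c - i)).getD 0) else 0) := by
    by_cases hir : i < r
    · have hc1 : 1 ≤ c := by
        by_contra hc
        have hc' : c = 0 := by omega
        rw [hc', pv_Rspec_zero] at hr
        omega
      have hm1 : 1 ≤ 2*c - i := by omega
      have hm2 : 2*c - i < i := by omega
      have hradm := hrad (2*c - i) hm1 (by omega)
      have hRm0 : 0 ≤ pvExtend l (2*c - i) 0 := pv_ext_ge l (2*c - i) 0
      have hRmle : pvExtend l (2*c - i) 0 ≤ min (2*c - i) ((l.length : Int) - (2*c - i)) :=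
        pv_ext_le l (2*c - i) 0 (by omega)
      have hMc : pvMatch l c (pvExtend l c 0) := pv_ext_match l c 0 (by intro j h1 h2; omega)
      have hMm : pvMatch l (2*c - i) (pvExtend l (2*c - i) 0) :=
        pv_ext_match l (2*c - i) 0 (by intro j h1 h2; omega)
      simp only [if_pos hir, hradm, Option.getD_some]
      refine ⟨by omega, by omega, ?_⟩
      intro j hj0 hjk
      have hjr : i + j < r := by omega
      have hjm : j < pvExtend l (2*c - i) 0 := by omega
      -- l[2c-i-1-j] = l[i+j]  (reflection of i+j across c)
      have e1 := hMc (i + j - c) (by omega) (by omega)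
      rw [show c - 1 - (i + j - c) = 2*c - i - 1 - j from by ring,
          show c + (i + j - c) = i + j from by ring] at e1
      -- l[2c-i-1-j] = l[2c-i+j]  (mirror radius)
      have e2 := hMm j hj0 hjm
      -- l[i-1-j] = l[2c-i+j]  (reflection of i-1-j across c, two cases)
      have e3 : PySem.List.pyGet? l (i - 1 - j) = PySem.List.pyGet? l (2*c - i + j) := by
        rcases le_or_gt c (i - 1 - j) with hcase | hcase
        · have e := hMc (i - 1 - j - c) (by omega) (by omega)
          rw [show c - 1 - (i - 1 - j - c) = 2*c - i + j from by ring,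
              show c + (i - 1 - j - c) = i - 1 - j from by ring] at e
          exact e.symm
        · have e := hMc (c - i + j) (by omega) (by omega)
          rw [show c - 1 - (c - i + j) = i - 1 - j from by ring,
              show c + (c - i + j) = 2*c - i + j from by ring] at e
          exact e
      rw [e3, ← e2, e1]
    · simp only [if_neg hir]
      exact ⟨le_refl 0, by omega, by intro j h1 h2; omega⟩
  obtain ⟨hk00, hk0m, hk0match⟩ := hk0
  have hkR : pvExtend l i (if i < r then min (r - i) ((PySem.List.pyGet? rad (2*c - i)).getD 0) else 0)
      = pvExtend l i 0 := (pv_ext_eq_of_match l i _ hk00 hk0m hk0match).symm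
  have hRi0 : 0 ≤ pvExtend l i 0 := pv_ext_ge l i 0
  have hilen : i < (rad.length : Int) := by omega
  unfold pvManStep pvInv
  simp only
  set k0 : Int := (if i < r then min (r - i) ((PySem.List.pyGet? rad (2*c - i)).getD 0) else 0) with hk0def
  have hlenS : (PySem.List.pySetD rad i (pvExtend l i k0)).length = l.length + 1 := by
    rw [pv_pySetD_len rad i _ (by omega) hilen]; exact hlen
  have hradS : ∀ j : Int, 1 ≤ j → j < i + 1 →
      PySem.List.pyGet? (PySem.List.pySetD rad i (pvExtend l i k0)) j = some (pvExtend l j 0) := by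
    intro j hj1 hji
    rw [pv_pySetD_get rad i j _ (by omega) hilen (by omega)]
    by_cases hji' : j = i
    · rw [if_pos hji', hji', hkR]
    · rw [if_neg hji']; exact hrad j hj1 (by omega)
  split
  · refine ⟨hlenS, hradS, show (0:Int) ≤ i from by omega, show i < i + 1 from by omega,
      show i + pvExtend l i k0 = i + pvExtend l i 0 from by rw [hkR]⟩
  · exact ⟨hlenS, hradS, hc0, show c < i + 1 from by omega, hr⟩

lemma pv_fold (l : List Char) (a : Int) (st : List Int × Int × Int)
    (ha : 1 ≤ a) (han : a ≤ (l.length : Int)) (h : pvInv l a st) :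
    pvInv l (l.length : Int) ((PySem.List.pyRange a (l.length : Int) 1).foldl (pvManStep l) st) := by
  rcases eq_or_lt_of_le han with heq | hlt
  · rw [heq, PySem.List.pyRange_one_eq_nil (le_refl _)]
    simpa [← heq] using h
  · rw [PySem.List.pyRange_one_cons hlt, List.foldl_cons]
    exact pv_fold l (a + 1) _ (by omega) (by omega) (pv_step l a st ha hlt h)
termination_by ((l.length : Int) - a).toNat
decreasing_by omega

lemma pv_posA_eq_filter (l : List Char) :
    pvPosA l = (PySem.List.pyRange 1 (l.length : Int) 1).filter
      (fun i => decide (PySem.List.slice l (some (max 0 (2*i - (l.length : Int)))) (some i) =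
        (PySem.List.slice? (PySem.List.slice l (some i) (some (2*i))) none none (-1)).getD [])) := by
  unfold pvPosA
  rw [PySem.List.foldl_append_ite_eq_filter]
  simp

lemma pv_mirrors_eq (l : List Char) : pvMirrors l = pvPosA l := by
  rw [pv_posA_eq_filter]
  unfold pvMirrors
  simp only
  rcases Nat.eq_zero_or_pos l.length with hl0 | hl1
  · rw [show ((l.length : Int)) = 0 from by omega]
    rw [PySem.List.pyRange_one_eq_nil (by omega)]
    rfl
  · have hinv := pv_fold l 1 (List.replicate ((l.length : Int).toNat + 1) 0, 0, 0)
      (le_refl 1) (by omega)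
      ⟨by simp, fun j hj1 hj2 => absurd (lt_of_le_of_lt hj1 hj2) (lt_irrefl 1),
        le_refl 0, show (0:Int) < 1 from by norm_num,
        show (0:Int) = 0 + pvExtend l 0 0 from by rw [pv_Rspec_zero]; ring⟩
    obtain ⟨-, hrad, -⟩ := hinv
    apply List.filter_congr
    intro i hi
    rw [PySem.List.mem_pyRange_one] at hi
    obtain ⟨hi1, hi2⟩ := hi
    rw [hrad i hi1 hi2]
    simp only [Option.getD_some]
    have hnat : i = ((i.toNat : Nat) : Int) := by omega
    rw [Bool.eq_iff_iff, beq_iff_eq, decide_eq_true_eq]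
    rw [pv_R_eq_min_iff l i hi1 hi2, hnat]
    exact (pv_cond_iff_match l i.toNat (by omega) (by omega)).symm

lemma pv_posA_pairwise (l : List Char) : (pvPosA l).Pairwise (· < ·) := by
  rw [pv_posA_eq_filter]
  exact List.Pairwise.filter _ (PySem.List.pairwise_lt_pyRange_one 1 (l.length : Int))

lemma pv_check_cube_fold (t : List String) (c : List Int) :
    (t.foldl (fun curr line =>
        match curr with
        | none => some (pvPosA line.toList)
        | some c => some ((pvPosA line.toList).filter (fun x => decide (x ∈ c))))
      (some c)).getD []
    = t.foldl (fun c line => (pvPosA line.toList).filter (fun x => decide (x ∈ c))) c := by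
  induction t generalizing c with
  | nil => rfl
  | cons l t ih => simp only [List.foldl_cons]; exact ih _

lemma pv_foldA_mem (t : List String) (c : List Int) (x : Int) :
    x ∈ t.foldl (fun c line => (pvPosA line.toList).filter (fun y => decide (y ∈ c))) c ↔
      x ∈ c ∧ ∀ line ∈ t, x ∈ pvPosA line.toList := by
  induction t generalizing c with
  | nil => simp
  | cons h t ih =>
    simp only [List.foldl_cons, ih, List.mem_filter, decide_eq_true_eq, List.mem_cons]
    constructor
    · rintro ⟨⟨hp, hc⟩, hall⟩
      exact ⟨hc, fun line hl => by rcases hl with rfl | hl; exacts [hp, hall line hl]⟩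
    · rintro ⟨hc, hall⟩
      exact ⟨⟨hall h (Or.inl rfl), hc⟩, fun line hl => hall line (Or.inr hl)⟩

lemma pv_foldA_pairwise (t : List String) (c : List Int) (hc : c.Pairwise (· < ·)) :
    (t.foldl (fun c line => (pvPosA line.toList).filter (fun y => decide (y ∈ c))) c).Pairwise (· < ·) := by
  induction t generalizing c with
  | nil => exact hc
  | cons h t ih =>
    simp only [List.foldl_cons]
    exact ih _ (List.Pairwise.filter _ (pv_posA_pairwise h.toList))

lemma pv_counts_getD (cube : List String) (d : PySem.Dict Int Int) (x : Int) :
    (cube.foldl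
        (fun d line => (pvMirrors line.toList).foldl (fun d i => d.insert i (d.getD i 0 + 1)) d) d).getD x 0
      = d.getD x 0 + ((cube.map (fun line => ((pvMirrors line.toList).count x : Int))).sum) := by
  induction cube generalizing d with
  | nil => simp
  | cons h t ih =>
    simp only [List.foldl_cons, List.map_cons, List.sum_cons]
    rw [ih, PySem.Dict.getD_foldl_insert_add_one]
    ring

lemma pv_counts_keys_mem (cube : List String) (d : PySem.Dict Int Int) (x : Int) :
    x ∈ (cube.foldl
        (fun d line => (pvMirrors line.toList).foldl (fun d i => d.insert i (d.getD i 0 + 1)) d) d).keys ↔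
      x ∈ d.keys ∨ ∃ line ∈ cube, x ∈ pvMirrors line.toList := by
  induction cube generalizing d with
  | nil => simp
  | cons h t ih =>
    simp only [List.foldl_cons, ih, PySem.Dict.keys_foldl_insert, PySem.Set.mem_update,
      List.mem_cons]
    constructor
    · rintro (⟨hk | hm⟩ | ⟨line, hl, hm⟩)
      exacts [Or.inl hk, Or.inr ⟨h, Or.inl rfl, hm⟩, Or.inr ⟨line, Or.inr hl, hm⟩]
    · rintro (hk | ⟨line, rfl | hl, hm⟩)
      exacts [Or.inl (Or.inl hk), Or.inl (Or.inr hm), Or.inr ⟨line, hl, hm⟩]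

lemma pv_counts_keys_nodup (cube : List String) (d : PySem.Dict Int Int) (hd : d.keys.Nodup) :
    (cube.foldl
        (fun d line => (pvMirrors line.toList).foldl (fun d i => d.insert i (d.getD i 0 + 1)) d) d).keys.Nodup := by
  induction cube generalizing d with
  | nil => exact hd
  | cons h t ih =>
    simp only [List.foldl_cons]
    apply ih
    rw [PySem.Dict.keys_foldl_insert]
    exact PySem.Set.nodup_update _ _ hd

lemma pv_eq_of_pairwise_lt (l1 l2 : List Int)
    (h1 : l1.Pairwise (· < ·)) (h2 : l2.Pairwise (· < ·)) (hm : ∀ x, x ∈ l1 ↔ x ∈ l2) :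
    l1 = l2 := by
  have n1 : l1.Nodup := h1.imp (fun h => ne_of_lt h)
  have n2 : l2.Nodup := h2.imp (fun h => ne_of_lt h)
  have hperm : l1.Perm l2 := (List.perm_ext_iff_of_nodup n1 n2).mpr hm
  have e1 := PySem.List.sorted_eq_of_perm_of_pairwise_lt l2 l1 (fun x => x) hperm h1
  have e2 := PySem.List.sorted_eq_of_perm_of_pairwise_lt l2 l2 (fun x => x) (List.Perm.refl l2) h2
  exact e1.symm.trans e2

lemma pv_final (h : String) (t : List String) :
    t.foldl (fun c line => (pvPosA line.toList).filter (fun x => decide (x ∈ c))) (pvPosA h.toList)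
    = (PySem.List.sorted
          (PySem.Dict.keys ((h :: t).foldl
            (fun d line => (pvPosA line.toList).foldl (fun d i => d.insert i (d.getD i 0 + 1)) d)
            (PySem.Dict.empty : PySem.Dict Int Int))) (fun x => x)).filter
        (fun i => ((h :: t).foldl
            (fun d line => (pvPosA line.toList).foldl (fun d i => d.insert i (d.getD i 0 + 1)) d)
            (PySem.Dict.empty : PySem.Dict Int Int)).getD i 0 == (((h :: t).length : Nat) : Int)) := by
  set counts := (h :: t).foldl
      (fun d line => (pvPosA line.toList).foldl (fun d i => d.insert i (d.getD i 0 + 1)) d)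
      (PySem.Dict.empty : PySem.Dict Int Int) with hcounts
  have hgetD : ∀ x : Int, counts.getD x 0 =
      (((h :: t).map (fun line => ((pvPosA line.toList).count x : Int))).sum) := by
    intro x
    have := pv_counts_getD (h :: t) PySem.Dict.empty x
    simp only [pv_mirrors_eq] at this
    rw [hcounts, this, PySem.Dict.getD_empty]
    ring
  have hposA_nodup : ∀ s : String, (pvPosA s.toList).Nodup :=
    fun s => (pv_posA_pairwise s.toList).imp (fun h => ne_of_lt h)
  have hcount01 : ∀ (s : String) (x : Int),
      ((pvPosA s.toList).count x : Int) = if decide (x ∈ pvPosA s.toList) = true then 1 else 0 := by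
    intro s x
    by_cases hx : x ∈ pvPosA s.toList
    · simp [hx, List.count_eq_one_of_mem (hposA_nodup s) hx]
    · simp [hx, List.count_eq_zero_of_not_mem hx]
  have hgetD' : ∀ x : Int, counts.getD x 0 =
      ((h :: t).countP (fun line => decide (x ∈ pvPosA line.toList)) : Int) := by
    intro x
    rw [hgetD x]
    rw [List.map_congr_left (fun line _ => hcount01 line x)]
    exact PySem.List.sum_map_ite_one_zero _ _
  apply pv_eq_of_pairwise_lt
  · exact pv_foldA_pairwise t _ (pv_posA_pairwise h.toList)
  · apply List.Pairwise.filter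
    have hs := PySem.List.sorted_pairwise (PySem.Dict.keys counts) (fun x => x)
    have hnd : (PySem.List.sorted (PySem.Dict.keys counts) (fun x => x)).Nodup := by
      have := pv_counts_keys_nodup (h :: t) PySem.Dict.empty PySem.Dict.nodup_keys_empty
      simp only [pv_mirrors_eq] at this
      rw [hcounts]
      exact ((PySem.List.sorted_perm (PySem.Dict.keys counts) (fun x => x) false).nodup_iff).mpr (hcounts ▸ this)
    exact (hs.and hnd).imp (fun hab => lt_of_le_of_ne hab.1 hab.2)
  · intro x
    rw [pv_foldA_mem, List.mem_filter, PySem.List.mem_sorted, beq_iff_eq, hgetD' x]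
    have hkeys : x ∈ counts.keys ↔ ∃ line ∈ h :: t, x ∈ pvPosA line.toList := by
      have := pv_counts_keys_mem (h :: t) PySem.Dict.empty x
      simp only [pv_mirrors_eq] at this
      rw [hcounts, this]
      simp
    rw [hkeys]
    have hlen : ((h :: t).countP (fun line => decide (x ∈ pvPosA line.toList)) : Int)
        = (((h :: t).length : Nat) : Int) ↔
        ∀ line ∈ h :: t, x ∈ pvPosA line.toList := by
      rw [show ((((h :: t).countP (fun line => decide (x ∈ pvPosA line.toList)) : Nat) : Int)
          = (((h :: t).length : Nat) : Int)) ↔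
          ((h :: t).countP (fun line => decide (x ∈ pvPosA line.toList)) = (h :: t).length)
        from by omega]
      rw [List.countP_eq_length]
      simp
    rw [hlen]
    constructor
    · rintro ⟨hx, hall⟩
      refine ⟨⟨h, List.mem_cons_self, hx⟩, ?_⟩
      intro line hl
      rcases List.mem_cons.mp hl with rfl | hl2
      exacts [hx, hall line hl2]
    · rintro ⟨-, hall⟩
      exact ⟨hall h List.mem_cons_self, fun line hl => hall line (List.mem_cons_of_mem _ hl)⟩

-- ===== VERDICT (by name: the statement is the Claim_ definition above) =====
theorem check_cube_spec : Claim_equal_check_cube := by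
  intro cube _hdom hpre
  unfold Spec_check_cube
  match cube with
  | [] => exact absurd rfl hpre
  | h :: t =>
    unfold check_cube check_cube_alt
    simp only [List.foldl_cons, pv_mirrors_eq]
    rw [pv_check_cube_fold]
    exact pv_final h t
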